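-- pv_equiv track=rewrite | github.com/fedallah-jr/ncs-simulator | tools/run_experiments.py | derive_batch_name
-- ===== SOURCE A (Python) =====
-- from typing import List, Optional, Sequence, Tuple
--
-- def derive_batch_name(ids: Sequence[int]) -> str:
--     """Compact encoding of an ID list: [1,2,3,5] -> '1-3_5'."""
--     if not ids:
--         return "empty"
--     sorted_ids = sorted(set(ids))
--     parts: List[str] = []
--     i = 0
--     while i < len(sorted_ids):
--         start = sorted_ids[i]
--         end = start
--         while i + 1 < len(sorted_ids) and sorted_ids[i + 1] == end + 1:
--             i += 1
--             end = sorted_ids[i]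
--         parts.append(str(start) if start == end else f"{start}-{end}")
--         i += 1
--     return "_".join(parts)
-- ===== SOURCE B (Python) =====
-- from typing import List, Sequence
--
-- def derive_batch_name(ids: Sequence[int]) -> str:
--     """Compact encoding of an ID list: [1,2,3,5] -> '1-3_5'."""
--     if not ids:
--         return "empty"
--     # On the sorted duplicate-free list the key v - i is constant exactly on
--     # maximal runs of consecutive values, so grouping by it yields the runs.
--     keyed = [(v - i, v) for i, v in enumerate(sorted(set(ids)))]
--     groups: List[tuple] = []
--     for k, v in keyed:
--         if groups and groups[-1][0] == k:
--             groups[-1][1].append(v)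
--         else:
--             groups.append((k, [v]))
--     return "_".join(
--         str(g[0]) if g[0] == g[-1] else f"{g[0]}-{g[-1]}" for _, g in groups
--     )
-- ===== Notes on version B (the rewrite author's own statement) =====
-- stated objective: alternative
-- what changed: Replaced A's index-based outer/inner while loops with look-ahead by a groupby-by-key pass: each element of sorted(set(ids)) is keyed with value-minus-index (constant exactly on maximal consecutive runs) and adjacent equal keys are grouped in one flat fold, each group formatted from its first and last member.
import Mathlib
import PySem

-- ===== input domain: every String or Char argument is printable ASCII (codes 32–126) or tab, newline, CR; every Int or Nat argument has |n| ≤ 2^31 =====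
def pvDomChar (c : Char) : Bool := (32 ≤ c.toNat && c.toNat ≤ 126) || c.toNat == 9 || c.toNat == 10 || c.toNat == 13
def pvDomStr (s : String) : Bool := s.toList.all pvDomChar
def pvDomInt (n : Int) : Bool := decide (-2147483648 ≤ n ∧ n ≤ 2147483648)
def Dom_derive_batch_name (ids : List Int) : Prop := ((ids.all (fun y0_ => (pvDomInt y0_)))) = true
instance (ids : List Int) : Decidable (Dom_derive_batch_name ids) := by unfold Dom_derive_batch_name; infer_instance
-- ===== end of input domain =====

-- B replaces A's index-based look-ahead while-loop by a groupby-style pass: it keys each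
-- element of sorted(set(ids)) with value-minus-index (constant on maximal consecutive runs)
-- and groups adjacent equal keys in one flat fold (objective: alternative, not faster).

-- ===== PORT A =====
-- inner 'while i + 1 < len and sorted_ids[i+1] == end + 1' : extend the run, return new end and rest
def pvAScan (e : Int) : List Int → Int × List Int
  | [] => (e, [])
  | y :: ys => if y == e + 1 then pvAScan y ys else (e, y :: ys)

theorem pvAScan_len (e : Int) (vs : List Int) : (pvAScan e vs).2.length ≤ vs.length := by
  induction vs generalizing e with
  | nil => simp [pvAScan]
  | cons y ys ih =>
    simp only [pvAScan]
    split
    · exact (ih y).trans (by simp)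
    · simp

-- outer 'while i < len(sorted_ids)' building parts
def pvALoop : List Int → List String
  | [] => []
  | x :: xs =>
    let p := pvAScan x xs
    (if x == p.1 then PySem.Int.toStr x
     else PySem.Int.toStr x ++ "-" ++ PySem.Int.toStr p.1) :: pvALoop p.2
termination_by l => l.length
decreasing_by exact Nat.lt_succ_of_le (pvAScan_len x xs)

def derive_batch_name (ids : List Int) : String :=
  if ids = [] then "empty"
  else PySem.Str.join "_" (pvALoop (PySem.List.sorted (PySem.Set.ofList ids) (fun x => x) false))

-- ===== PORT B =====
-- one step of B's flat grouping loop: append v to the last group if its key matches, else open a new group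
def pvBStep (groups : List (Int × List Int)) (p : Int × Int) : List (Int × List Int) :=
  match groups.getLast? with
  | some g => if g.1 == p.1 then groups.dropLast ++ [(g.1, g.2 ++ [p.2])]
              else groups ++ [(p.1, [p.2])]
  | none => [(p.1, [p.2])]

-- str(g[0]) if g[0] == g[-1] else f"{g[0]}-{g[-1]}"
def pvBFmt (g : Int × List Int) : String :=
  let st := PySem.List.pyGetD g.2 0 0
  let en := PySem.List.pyGetD g.2 (-1) 0
  if st == en then PySem.Int.toStr st
  else PySem.Int.toStr st ++ "-" ++ PySem.Int.toStr en

def derive_batch_name_alt (ids : List Int) : String :=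
  if ids = [] then "empty"
  else
    let s := PySem.List.sorted (PySem.Set.ofList ids) (fun x => x) false
    let keyed := (PySem.List.enumerate s).map (fun p => (p.2 - p.1, p.2))
    let groups := keyed.foldl pvBStep []
    PySem.Str.join "_" (groups.map pvBFmt)

-- ===== PRECONDITION & SPEC =====
def Spec_derive_batch_name (ids : List Int) (out : String) : Prop := out = derive_batch_name_alt ids
instance (ids : List Int) (out : String) : Decidable (Spec_derive_batch_name ids out) := by unfold Spec_derive_batch_name; infer_instance

-- ===== CLAIM (what is proved, stated in full; the proofs are below) =====
def Claim_equal_derive_batch_name : Prop := ∀ (ids : List Int), Dom_derive_batch_name ids → Spec_derive_batch_name ids (derive_batch_name ids)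

-- ===== LEMMAS AND PROOFS =====

-- the keyed list [(v - i, v)] with indices starting at c
def pvKeyed (c : Int) : List Int → List (Int × Int)
  | [] => []
  | v :: vs => (v - c, v) :: pvKeyed (c + 1) vs

-- grouping of adjacent equal keys, recursively
def pvGA : List (Int × Int) → List (Int × List Int)
  | [] => []
  | p :: ps => (p.1, p.2 :: (ps.takeWhile (fun q => q.1 == p.1)).map (·.2)) ::
      pvGA (ps.dropWhile (fun q => q.1 == p.1))
termination_by l => l.length
decreasing_by exact Nat.lt_succ_of_le (List.length_dropWhile_le _ ps)

-- the values of the maximal consecutive run following e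
def pvRun (e : Int) : List Int → List Int
  | [] => []
  | y :: ys => if y == e + 1 then y :: pvRun y ys else []

theorem pvKeyed_enumerate (s : List Int) : ∀ c : Int,
    (PySem.List.enumerate s c).map (fun p => (p.2 - p.1, p.2)) = pvKeyed c s := by
  induction s with
  | nil => intro c; simp [pvKeyed, PySem.List.enumerate_nil]
  | cons v vs ih => intro c; simp [pvKeyed, PySem.List.enumerate_cons, ih]

theorem pvFold_concat (ps : List (Int × Int)) : ∀ (init : List (Int × List Int)) (k : Int) (run : List Int),
    ps.foldl pvBStep (init ++ [(k, run)]) =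
      init ++ (k, run ++ (ps.takeWhile (fun q => q.1 == k)).map (·.2)) ::
        pvGA (ps.dropWhile (fun q => q.1 == k)) := by
  induction ps with
  | nil => intro init k run; simp [pvGA]
  | cons p tl ih =>
    intro init k run
    by_cases h : p.1 = k
    · have : pvBStep (init ++ [(k, run)]) p = init ++ [(k, run ++ [p.2])] := by
        simp [pvBStep, h]
      rw [List.foldl_cons, this, ih]
      simp [h]
    · have h' : ¬ k = p.1 := fun hh => h hh.symm
      have : pvBStep (init ++ [(k, run)]) p = (init ++ [(k, run)]) ++ [(p.1, [p.2])] := by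
        simp [pvBStep, h']
      rw [List.foldl_cons, this, ih]
      have hGA : pvGA (p :: tl) = (p.1, p.2 :: (tl.takeWhile (fun q => q.1 == p.1)).map (·.2)) ::
          pvGA (tl.dropWhile (fun q => q.1 == p.1)) := by
        rw [pvGA]
      simp [h, hGA]

theorem pvFold_nil (ps : List (Int × Int)) : ps.foldl pvBStep [] = pvGA ps := by
  cases ps with
  | nil => simp [pvGA]
  | cons p tl =>
    have h0 : pvBStep [] p = [] ++ [(p.1, [p.2])] := by simp [pvBStep]
    rw [List.foldl_cons, h0, pvFold_concat, pvGA]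
    simp

theorem pvTake (vs : List Int) : ∀ (e c : Int),
    ((pvKeyed (c + 1) vs).takeWhile (fun q => q.1 == e - c)).map (·.2) = pvRun e vs := by
  induction vs with
  | nil => intro e c; simp [pvKeyed, pvRun]
  | cons y ys ih =>
    intro e c
    rw [pvKeyed, List.takeWhile_cons, pvRun]
    by_cases h : y = e + 1
    · subst h
      rw [show e + 1 - (c + 1) = e - c from by ring]
      simp only [beq_self_eq_true, if_pos, List.map_cons]
      rw [show e - c = (e + 1) - (c + 1) from by ring, ih (e + 1) (c + 1)]
    · have hk : (y - (c + 1) == e - c) = false := by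
        apply beq_eq_false_iff_ne.mpr; omega
      have hy : (y == e + 1) = false := by
        apply beq_eq_false_iff_ne.mpr; omega
      rw [hk, hy]
      simp

theorem pvDrop (vs : List Int) : ∀ (e c : Int),
    (pvKeyed (c + 1) vs).dropWhile (fun q => q.1 == e - c) =
      pvKeyed (c + 1 + (pvRun e vs).length) (pvAScan e vs).2 := by
  induction vs with
  | nil => intro e c; simp [pvKeyed, pvRun, pvAScan]
  | cons y ys ih =>
    intro e c
    rw [pvKeyed, List.dropWhile_cons, pvRun, pvAScan]
    by_cases h : y = e + 1
    · subst h
      rw [show e + 1 - (c + 1) = e - c from by ring]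
      simp only [beq_self_eq_true, if_pos]
      rw [show e - c = (e + 1) - (c + 1) from by ring, ih (e + 1) (c + 1)]
      congr 1
      simp only [List.length_cons]
      push_cast
      ring
    · have hk : (y - (c + 1) == e - c) = false := by
        apply beq_eq_false_iff_ne.mpr; omega
      have hy : (y == e + 1) = false := by
        apply beq_eq_false_iff_ne.mpr; omega
      rw [hk, hy]
      simp [pvKeyed]

theorem pyGetD_neg_one_cons (a : Int) (l : List Int) (h : l ≠ []) :
    PySem.List.pyGetD (a :: l) (-1) 0 = PySem.List.pyGetD l (-1) 0 := by
  cases l with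
  | nil => simp at h
  | cons b t =>
    simp [PySem.List.pyGetD, PySem.List.pyGet?, PySem.List.pyIdx?]
    rfl

theorem pvLastRun (vs : List Int) : ∀ e : Int,
    PySem.List.pyGetD (e :: pvRun e vs) (-1) 0 = (pvAScan e vs).1 := by
  induction vs with
  | nil => intro e; simp [pvRun, pvAScan]; rfl
  | cons y ys ih =>
    intro e
    rw [pvRun, pvAScan]
    by_cases h : y = e + 1
    · subst h
      simp only [beq_self_eq_true, if_pos]
      rw [pyGetD_neg_one_cons e ((e + 1) :: pvRun (e + 1) ys) (by simp)]
      exact ih (e + 1)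
    · have hy : (y == e + 1) = false := by
        apply beq_eq_false_iff_ne.mpr; omega
      rw [hy]
      simp
      rfl

theorem pvHead (v : Int) (l : List Int) : PySem.List.pyGetD (v :: l) 0 0 = v := by
  simp [pysem]

theorem pvMain : ∀ (n : Nat) (s : List Int), s.length ≤ n → ∀ c : Int,
    (pvGA (pvKeyed c s)).map pvBFmt = pvALoop s := by
  intro n
  induction n with
  | zero =>
    intro s hs c
    cases s with
    | nil => simp [pvKeyed, pvGA, pvALoop]
    | cons v vs => simp at hs
  | succ n ih =>
    intro s hs c
    cases s with
    | nil => simp [pvKeyed, pvGA, pvALoop]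
    | cons v vs =>
      rw [pvKeyed, pvGA, pvALoop]
      simp only [List.map_cons]
      have htake := pvTake vs v c
      have hdrop := pvDrop vs v c
      have hfmt : pvBFmt (v - c, v :: pvRun v vs) =
          (if v == (pvAScan v vs).1 then PySem.Int.toStr v
           else PySem.Int.toStr v ++ "-" ++ PySem.Int.toStr (pvAScan v vs).1) := by
        simp only [pvBFmt, pvHead, pvLastRun]
      have htail : (pvGA (pvKeyed (c + 1 + (pvRun v vs).length) (pvAScan v vs).2)).map pvBFmt =
          pvALoop (pvAScan v vs).2 := by
        apply ih
        have := pvAScan_len v vs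
        simp only [List.length_cons] at hs
        omega
      rw [htake, hdrop, hfmt, htail]

-- ===== VERDICT (by name: the statement is the Claim_ definition above) =====
theorem derive_batch_name_spec : Claim_equal_derive_batch_name := by
  intro ids _
  unfold Spec_derive_batch_name derive_batch_name derive_batch_name_alt
  by_cases h : ids = []
  · simp [h]
  · rw [if_neg h, if_neg h]
    have hmain := pvMain (PySem.List.sorted (PySem.Set.ofList ids) (fun x => x) false).length
      (PySem.List.sorted (PySem.Set.ofList ids) (fun x => x) false) (le_refl _) 0
    simp only [pvKeyed_enumerate, pvFold_nil, hmain]
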